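-- pv_equiv track=rewrite | github.com/suic86/adventofcode | 2018/day_03/solution.py | inches
-- ===== SOURCE A (Python) =====
-- Claim = tuple[int, int, int, int, int]
--
-- Coord = tuple[int, int]
--
-- def inches(claims: list[Claim]) -> tuple[set[Coord], set[Coord]]:
--     overlaping: set[Coord] = set()
--     non_overlaping: set[Coord] = set()
--     for _, x, y, w, h in claims:
--         for dx in range(w):
--             for dy in range(h):
--                 inch = (x + dx, y + dy)
--                 if inch in overlaping:
--                     continue
--                 elif inch in non_overlaping:
--                     overlaping.add(inch)
--                     non_overlaping.remove(inch)
--                 else: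
--                     non_overlaping.add(inch)
--     return overlaping, non_overlaping
-- ===== SOURCE B (Python) =====
-- def inches(claims):
--     # Pass 1: build the full coverage table (a counting dict) and, as a by-product,
--     # a chronological log of the first two coverings of each cell; coverings past
--     # the second are irrelevant and are not logged. No set is touched here.
--     count = {}
--     log = []
--     for _, x, y, w, h in claims:
--         for dx in range(w):
--             for dy in range(h):
--                 c = (x + dx, y + dy)
--                 n = count.get(c, 0) + 1
--                 count[c] = n
--                 if n <= 2:
--                     log.append((c, n))
--     # Pass 2: replay the log to materialise the two sets: a first covering makes a
--     # cell non-overlapping, a second covering promotes it to overlapping.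
--     overlapping = set()
--     non_overlapping = set()
--     for c, n in log:
--         if n == 1:
--             non_overlapping.add(c)
--         else:
--             overlapping.add(c)
--             non_overlapping.remove(c)
--     return overlapping, non_overlapping
-- ===== Notes on version B (the rewrite author's own statement) =====
-- stated objective: alternative
-- what changed: B is a two-stage pipeline: pass 1 builds the full coverage-count table (a dict) and compiles a chronological log of each cell's first two coverings, deciding everything by counts with no set membership tests; pass 2 replays that log to materialise the two sets. A instead classifies each cell inside the nested loops by testing membership in the two evolving sets and moving cells between them.
import Mathlib
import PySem

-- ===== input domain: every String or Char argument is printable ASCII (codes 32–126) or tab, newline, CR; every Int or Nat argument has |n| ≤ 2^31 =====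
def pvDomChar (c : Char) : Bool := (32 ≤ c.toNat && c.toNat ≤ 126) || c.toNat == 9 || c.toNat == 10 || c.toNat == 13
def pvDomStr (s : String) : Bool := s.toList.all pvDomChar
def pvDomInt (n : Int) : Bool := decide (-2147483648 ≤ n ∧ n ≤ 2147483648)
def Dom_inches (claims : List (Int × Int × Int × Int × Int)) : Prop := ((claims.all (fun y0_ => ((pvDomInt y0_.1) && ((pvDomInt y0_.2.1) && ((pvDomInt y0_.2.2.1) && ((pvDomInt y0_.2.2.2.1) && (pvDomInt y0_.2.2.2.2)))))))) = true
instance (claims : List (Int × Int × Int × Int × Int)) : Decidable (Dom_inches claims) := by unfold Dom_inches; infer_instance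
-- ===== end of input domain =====

-- B is a two-stage pipeline — pass 1 builds the coverage-count table and a log of each
-- cell's first two coverings (counts only, no set membership tests), pass 2 replays the
-- log into the two sets — instead of A's in-loop classification by set membership
-- (objective: alternative).

-- ===== PORT A =====
-- the body of A's innermost loop: classify one cell into the two sets
def aStep (st : PySem.Set (Int × Int) × PySem.Set (Int × Int)) (inch : Int × Int) :
    PySem.Set (Int × Int) × PySem.Set (Int × Int) :=
  if inch ∈ st.1 then st
  else if inch ∈ st.2 then (PySem.Set.add st.1 inch, (PySem.Set.remove? st.2 inch).getD st.2)
  else (st.1, PySem.Set.add st.2 inch)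

def inches (claims : List (Int × Int × Int × Int × Int)) :
    (List (Int × Int)) × (List (Int × Int)) :=
  claims.foldl (fun st c =>
    (PySem.List.pyRange 0 c.2.2.2.1 1).foldl (fun st dx =>
      (PySem.List.pyRange 0 c.2.2.2.2 1).foldl (fun st dy =>
        aStep st (c.2.1 + dx, c.2.2.1 + dy)) st) st)
    (PySem.Set.empty, PySem.Set.empty)

-- ===== PORT B =====
-- B's pass-1 loop body: bump the cell's count; log the first two coverings
def bStep (st : PySem.Dict (Int × Int) Int × List ((Int × Int) × Int)) (c : Int × Int) :
    PySem.Dict (Int × Int) Int × List ((Int × Int) × Int) :=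
  let n := st.1.getD c 0 + 1
  (st.1.insert c n, if n ≤ 2 then st.2 ++ [(c, n)] else st.2)

-- B's pass-2 loop body: replay one logged covering into the two sets
def rStep (st : PySem.Set (Int × Int) × PySem.Set (Int × Int)) (e : (Int × Int) × Int) :
    PySem.Set (Int × Int) × PySem.Set (Int × Int) :=
  if e.2 == 1 then (st.1, PySem.Set.add st.2 e.1)
  else (PySem.Set.add st.1 e.1, (PySem.Set.remove? st.2 e.1).getD st.2)

def inches_alt (claims : List (Int × Int × Int × Int × Int)) :
    (List (Int × Int)) × (List (Int × Int)) :=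
  let st := claims.foldl (fun st c =>
    (PySem.List.pyRange 0 c.2.2.2.1 1).foldl (fun st dx =>
      (PySem.List.pyRange 0 c.2.2.2.2 1).foldl (fun st dy =>
        bStep st (c.2.1 + dx, c.2.2.1 + dy)) st) st)
    (PySem.Dict.empty, [])
  st.2.foldl rStep (PySem.Set.empty, PySem.Set.empty)

-- ===== PRECONDITION & SPEC =====
def Spec_inches (claims : List (Int × Int × Int × Int × Int)) (out : (List (Int × Int)) × (List (Int × Int))) : Prop := out = inches_alt claims
instance (claims : List (Int × Int × Int × Int × Int)) (out : (List (Int × Int)) × (List (Int × Int))) : Decidable (Spec_inches claims out) := by unfold Spec_inches; infer_instance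

-- ===== CLAIM (what is proved, stated in full; the proofs are below) =====
def Claim_equal_inches : Prop := ∀ (claims : List (Int × Int × Int × Int × Int)), Dom_inches claims → Spec_inches claims (inches claims)

-- ===== LEMMAS AND PROOFS =====

-- the flattened cell list both nested loops traverse
def cellsOf (claims : List (Int × Int × Int × Int × Int)) : List (Int × Int) :=
  claims.flatMap (fun c =>
    (PySem.List.pyRange 0 c.2.2.2.1 1).flatMap (fun dx =>
      (PySem.List.pyRange 0 c.2.2.2.2 1).map (fun dy => (c.2.1 + dx, c.2.2.1 + dy))))

lemma inches_eq_fold_cells (claims : List (Int × Int × Int × Int × Int)) :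
    inches claims = (cellsOf claims).foldl aStep (PySem.Set.empty, PySem.Set.empty) := by
  simp [inches, cellsOf, List.foldl_flatMap, List.foldl_map]

lemma alt_eq_fold_cells (claims : List (Int × Int × Int × Int × Int)) :
    inches_alt claims =
      ((cellsOf claims).foldl bStep (PySem.Dict.empty, [])).2.foldl rStep
        (PySem.Set.empty, PySem.Set.empty) := by
  simp [inches_alt, cellsOf, List.foldl_flatMap, List.foldl_map]

-- the loop invariant: the counter decides A's membership tests, and replaying B's log
-- reproduces A's two sets
def LoopInv (d : PySem.Dict (Int × Int) Int) (log : List ((Int × Int) × Int))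
    (ov nv : List (Int × Int)) : Prop :=
  (∀ c, 0 ≤ d.getD c 0) ∧
  (∀ c, c ∈ ov ↔ 2 ≤ d.getD c 0) ∧
  (∀ c, c ∈ nv ↔ d.getD c 0 = 1) ∧
  log.foldl rStep (PySem.Set.empty, PySem.Set.empty) = (ov, nv)

-- one step of pass 1 extends the log by exactly one replay step of A's classification
lemma step_inv (d : PySem.Dict (Int × Int) Int) (log : List ((Int × Int) × Int))
    (ov nv : List (Int × Int)) (c : Int × Int) (h : LoopInv d log ov nv) :
    LoopInv (bStep (d, log) c).1 (bStep (d, log) c).2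
            (aStep (ov, nv) c).1 (aStep (ov, nv) c).2 := by
  obtain ⟨hpos, hov, hnv, hrep⟩ := h
  have hposc := hpos c
  have hposi : ∀ c', 0 ≤ (d.insert c (d.getD c 0 + 1)).getD c' 0 := by
    intro c'
    rw [PySem.Dict.getD_insert]
    by_cases hc : c' = c
    · simp [hc]; omega
    · simp [hc, hpos c']
  by_cases h0 : d.getD c 0 = 0
  · -- first covering: A adds c to non-overlapping, B logs (c, 1)
    have hcov : c ∉ ov := by rw [hov]; omega
    have hcnv : c ∉ nv := by rw [hnv]; omega
    have ha : aStep (ov, nv) c = (ov, PySem.Set.add nv c) := by simp [aStep, hcov, hcnv]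
    have hb : bStep (d, log) c = (d.insert c (d.getD c 0 + 1), log ++ [(c, d.getD c 0 + 1)]) := by
      simp [bStep, h0]
    rw [ha, hb]
    refine ⟨hposi, ?_, ?_, ?_⟩
    · intro c'
      rw [PySem.Dict.getD_insert]
      by_cases hc : c' = c
      · subst hc; simp [hcov, h0]
      · simp [hc, hov c']
    · intro c'
      rw [PySem.Dict.getD_insert, PySem.Set.mem_add]
      by_cases hc : c' = c
      · subst hc; simp [h0]
      · simp [hc, hnv c']
    · rw [List.foldl_append, hrep]
      simp [rStep, h0]
  · by_cases h1 : d.getD c 0 = 1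
    · -- second covering: A moves c across, B logs (c, 2)
      have hcov : c ∉ ov := by rw [hov]; omega
      have hcnv : c ∈ nv := (hnv c).2 h1
      have ha : aStep (ov, nv) c
          = (PySem.Set.add ov c, (PySem.Set.remove? nv c).getD nv) := by
        simp [aStep, hcov, hcnv]
      have hb : bStep (d, log) c = (d.insert c (d.getD c 0 + 1), log ++ [(c, d.getD c 0 + 1)]) := by
        simp [bStep, h1]
      rw [ha, hb]
      refine ⟨hposi, ?_, ?_, ?_⟩
      · intro c'
        rw [PySem.Dict.getD_insert, PySem.Set.mem_add]
        by_cases hc : c' = c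
        · subst hc; simp [h1]
        · simp [hc, hov c']
      · intro c'
        rw [PySem.Dict.getD_insert, PySem.Set.remove?_of_mem hcnv]
        simp only [Option.getD_some, PySem.Set.mem_discard]
        by_cases hc : c' = c
        · subst hc; simp [h1]
        · simp [hc, hnv c']
      · rw [List.foldl_append, hrep]
        simp [rStep, h1]
    · -- later coverings: the count is already ≥ 2, A skips, B logs nothing
      have h2 : 2 ≤ d.getD c 0 := by omega
      have hcov : c ∈ ov := (hov c).2 h2
      have ha : aStep (ov, nv) c = (ov, nv) := by simp [aStep, hcov]
      have hb : bStep (d, log) c = (d.insert c (d.getD c 0 + 1), log) := by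
        have : ¬ d.getD c 0 + 1 ≤ 2 := by omega
        simp [bStep, this]
      rw [ha, hb]
      refine ⟨hposi, ?_, ?_, hrep⟩
      · intro c'
        rw [PySem.Dict.getD_insert]
        by_cases hc : c' = c
        · subst hc; simp [hcov]; omega
        · simp [hc, hov c']
      · intro c'
        rw [PySem.Dict.getD_insert]
        by_cases hc : c' = c
        · have hcn : c' ∉ nv := by rw [hnv c', hc]; omega
          rw [if_pos hc]
          simp [hcn]
          omega
        · simp [hc, hnv c']

-- the invariant carried through the whole cell list
lemma fold_inv (l : List (Int × Int)) :
    ∀ (d : PySem.Dict (Int × Int) Int) (log : List ((Int × Int) × Int))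
      (ov nv : List (Int × Int)),
    LoopInv d log ov nv →
    LoopInv (l.foldl bStep (d, log)).1 (l.foldl bStep (d, log)).2
            (l.foldl aStep (ov, nv)).1 (l.foldl aStep (ov, nv)).2 := by
  induction l with
  | nil => intro d log ov nv h; exact h
  | cons c t ih =>
    intro d log ov nv h
    have hstep := step_inv d log ov nv c h
    simpa using ih (bStep (d, log) c).1 (bStep (d, log) c).2
      (aStep (ov, nv) c).1 (aStep (ov, nv) c).2 hstep

lemma inv_init : LoopInv PySem.Dict.empty [] PySem.Set.empty PySem.Set.empty := by
  refine ⟨?_, ?_, ?_, rfl⟩ <;> intro c <;> simp [PySem.Dict.getD_empty, PySem.Set.empty]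

-- ===== VERDICT (by name: the statement is the Claim_ definition above) =====
theorem inches_spec : Claim_equal_inches := by
  intro claims _
  show inches claims = inches_alt claims
  rw [inches_eq_fold_cells, alt_eq_fold_cells]
  obtain ⟨-, -, -, hrep⟩ :=
    fold_inv (cellsOf claims) PySem.Dict.empty [] PySem.Set.empty PySem.Set.empty inv_init
  rw [hrep]
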